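-- pv_equiv track=rewrite | github.com/Scorpio69t/globaaa | algos/i/rose.py | rose
-- ===== SOURCE A (Python) =====
-- def rose(array, indexArray, lower, upper, size):
--   if indexArray == []:
--     return []
--
--   index = indexArray[0]
--
--   if (index <= upper) and (index >= lower) and (index - lower) == size:
--     return [index]
--   elif (index <= upper) and (index >= lower) and (upper - index) == size:
--     return [index]
--   else:
--     left = rose(array, indexArray[1:len(indexArray) + 1], lower, index - 1, size)
--     right = rose(array, indexArray[1:len(indexArray) + 1], index + 1, upper, size)
--     return left + right
-- ===== SOURCE B (Python) =====
-- def rose(array, indexArray, lower, upper, size):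
--     n = len(indexArray)
--     memo = {}
--
--     def go(i, lo, hi):
--         key = (i, lo, hi)
--         if key in memo:
--             return memo[key]
--         if i == n:
--             r = []
--         else:
--             idx = indexArray[i]
--             if lo <= idx <= hi and (idx - lo == size or hi - idx == size):
--                 r = [idx]
--             else:
--                 r = go(i + 1, lo, idx - 1) + go(i + 1, idx + 1, hi)
--         memo[key] = r
--         return r
--
--     return go(0, lower, upper)
-- ===== Notes on version B (the rewrite author's own statement) =====
-- stated objective: alternative
-- what changed: Replaces A's exponential branching recursion that re-slices the list at every call by a memoized recursion keyed on (position, lower, upper) with an index pointer into the list, so each distinct state is computed once.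
import Mathlib
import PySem

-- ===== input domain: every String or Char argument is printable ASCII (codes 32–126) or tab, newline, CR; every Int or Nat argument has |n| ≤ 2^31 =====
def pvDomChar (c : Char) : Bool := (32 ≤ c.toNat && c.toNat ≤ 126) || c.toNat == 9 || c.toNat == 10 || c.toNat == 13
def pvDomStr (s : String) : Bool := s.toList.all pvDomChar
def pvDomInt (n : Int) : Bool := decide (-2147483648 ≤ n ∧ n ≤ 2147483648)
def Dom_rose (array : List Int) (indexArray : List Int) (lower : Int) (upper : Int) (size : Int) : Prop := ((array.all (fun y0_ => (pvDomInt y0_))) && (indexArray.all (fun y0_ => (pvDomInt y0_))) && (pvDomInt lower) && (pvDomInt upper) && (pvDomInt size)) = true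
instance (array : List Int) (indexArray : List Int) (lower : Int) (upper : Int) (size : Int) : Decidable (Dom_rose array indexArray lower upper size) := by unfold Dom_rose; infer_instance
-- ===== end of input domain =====

-- B replaces A's exponential branching recursion (which re-slices the list) by a memoized
-- recursion on (position, lower, upper) with an index pointer, so each distinct state is computed
-- once; same return value on every input.

-- ===== PORT A =====
-- 'indexArray[1:len(indexArray)+1]' is the tail; proved here so the recursion is seen to shrink.
theorem pvSliceTail (x : Int) (xs : List Int) (b : Int) (hb : (xs.length : Int) + 1 ≤ b) :
    PySem.List.slice (x :: xs) (some 1) (some b) = xs := by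
  rw [PySem.List.slice_toNat (x :: xs) (by omega : (0:Int) ≤ 1) (by omega : 0 ≤ b)]
  simp only [Int.toNat_one, List.drop_succ_cons, List.drop_zero]
  exact List.take_of_length_le (by omega)

def rose (array : List Int) (indexArray : List Int) (lower : Int) (upper : Int) (size : Int) : List Int :=
  match indexArray with
  | [] => []
  | index :: rest =>
    if index ≤ upper ∧ index ≥ lower ∧ index - lower = size then [index]
    else if index ≤ upper ∧ index ≥ lower ∧ upper - index = size then [index]
    else
      let tail := PySem.List.slice (index :: rest) (some 1) (some (((index :: rest).length : Int) + 1))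
      rose array tail lower (index - 1) size ++ rose array tail (index + 1) upper size
termination_by indexArray.length
decreasing_by all_goals (rw [pvSliceTail _ _ _ (by simp only [List.length_cons]; push_cast; omega)]; simp)

-- ===== PORT B =====
def roseGoB (size : Int) (i : Int) (rest : List Int) (lo : Int) (hi : Int)
    (memo : PySem.Dict (Int × Int × Int) (List Int)) :
    List Int × PySem.Dict (Int × Int × Int) (List Int) :=
  match memo.get? (i, lo, hi) with
  | some v => (v, memo)
  | none =>
    match rest with
    | [] => ([], memo.insert (i, lo, hi) [])
    | idx :: tl =>
      if lo ≤ idx ∧ idx ≤ hi ∧ (idx - lo = size ∨ hi - idx = size) then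
        ([idx], memo.insert (i, lo, hi) [idx])
      else
        let p := roseGoB size (i + 1) tl lo (idx - 1) memo
        let q := roseGoB size (i + 1) tl (idx + 1) hi p.2
        (p.1 ++ q.1, q.2.insert (i, lo, hi) (p.1 ++ q.1))

def rose_alt (array : List Int) (indexArray : List Int) (lower : Int) (upper : Int) (size : Int) : List Int :=
  (roseGoB size 0 indexArray lower upper PySem.Dict.empty).1

-- ===== PRECONDITION & SPEC =====
def Spec_rose (array : List Int) (indexArray : List Int) (lower : Int) (upper : Int) (size : Int) (out : List Int) : Prop := out = rose_alt array indexArray lower upper size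
instance (array : List Int) (indexArray : List Int) (lower : Int) (upper : Int) (size : Int) (out : List Int) : Decidable (Spec_rose array indexArray lower upper size out) := by unfold Spec_rose; infer_instance

-- ===== CLAIM (what is proved, stated in full; the proofs are below) =====
def Claim_equal_rose : Prop := ∀ (array : List Int) (indexArray : List Int) (lower : Int) (upper : Int) (size : Int), Dom_rose array indexArray lower upper size → Spec_rose array indexArray lower upper size (rose array indexArray lower upper size)

-- ===== LEMMAS AND PROOFS =====
theorem rose_nil (array : List Int) (lower upper size : Int) :
    rose array [] lower upper size = [] := by rw [rose]

theorem rose_cons (array : List Int) (idx : Int) (tl : List Int) (lower upper size : Int) :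
    rose array (idx :: tl) lower upper size =
      if idx ≤ upper ∧ idx ≥ lower ∧ idx - lower = size then [idx]
      else if idx ≤ upper ∧ idx ≥ lower ∧ upper - idx = size then [idx]
      else rose array tl lower (idx - 1) size ++ rose array tl (idx + 1) upper size := by
  rw [rose, pvSliceTail _ _ _ (by simp only [List.length_cons]; push_cast; omega)]

-- memo invariant: every stored value is A's answer for the suffix at that position
def MemoInv (array L : List Int) (size : Int)
    (memo : PySem.Dict (Int × Int × Int) (List Int)) : Prop :=
  ∀ i lo hi v, memo.get? (i, lo, hi) = some v → v = rose array (L.drop i.toNat) lo hi size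

theorem goB_correct (array L : List Int) (size : Int) :
    ∀ (rest : List Int) (i lo hi : Int)
      (memo : PySem.Dict (Int × Int × Int) (List Int)),
      0 ≤ i → rest = L.drop i.toNat → MemoInv array L size memo →
      (roseGoB size i rest lo hi memo).1 = rose array rest lo hi size ∧
      MemoInv array L size (roseGoB size i rest lo hi memo).2 := by
  intro rest
  induction rest with
  | nil =>
    intro i lo hi memo hi0 hdrop hinv
    rw [roseGoB]
    cases hget : memo.get? (i, lo, hi) with
    | some v =>
      refine ⟨?_, hinv⟩
      have := hinv i lo hi v hget
      simp [this, ← hdrop]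
    | none =>
      refine ⟨by simp [rose_nil], ?_⟩
      intro j lo' hi' v hv
      simp only [PySem.Dict.get?_insert] at hv
      split_ifs at hv with hk
      · injection hv with hveq
        subst hveq
        obtain ⟨rfl, rfl, rfl⟩ : j = i ∧ lo' = lo ∧ hi' = hi := by simpa using hk
        rw [← hdrop, rose_nil]
      · exact hinv j lo' hi' v hv
  | cons idx tl ih =>
    intro i lo hi memo hi0 hdrop hinv
    have htl : tl = L.drop (i + 1).toNat := by
      have h1 : (i + 1).toNat = i.toNat + 1 := by omega
      rw [h1, ← List.tail_drop, ← hdrop]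
      rfl
    rw [roseGoB]
    cases hget : memo.get? (i, lo, hi) with
    | some v =>
      refine ⟨?_, hinv⟩
      have := hinv i lo hi v hget
      simp [this, ← hdrop]
    | none =>
      by_cases hc : lo ≤ idx ∧ idx ≤ hi ∧ (idx - lo = size ∨ hi - idx = size)
      · simp only [if_pos hc]
        have hval : rose array (idx :: tl) lo hi size = [idx] := by
          rw [rose_cons]; rcases hc with ⟨h1, h2, h3 | h3⟩
          · rw [if_pos ⟨h2, h1, h3⟩]
          · by_cases h4 : idx ≤ hi ∧ idx ≥ lo ∧ idx - lo = size
            · rw [if_pos h4]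
            · rw [if_neg h4, if_pos ⟨h2, h1, h3⟩]
        refine ⟨hval.symm, ?_⟩
        intro j lo' hi' v hv
        simp only [PySem.Dict.get?_insert] at hv
        split_ifs at hv with hk
        · injection hv with hveq
          subst hveq
          obtain ⟨rfl, rfl, rfl⟩ : j = i ∧ lo' = lo ∧ hi' = hi := by simpa using hk
          rw [← hdrop, hval]
        · exact hinv j lo' hi' v hv
      · simp only [if_neg hc]
        obtain ⟨hp1, hpinv⟩ := ih (i + 1) lo (idx - 1) memo (by omega) htl hinv
        obtain ⟨hq1, hqinv⟩ := ih (i + 1) (idx + 1) hi _ (by omega) htl hpinv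
        have hval : rose array (idx :: tl) lo hi size =
            rose array tl lo (idx - 1) size ++ rose array tl (idx + 1) hi size := by
          rw [rose_cons]
          rw [if_neg (by rintro ⟨a, b, c⟩; exact hc ⟨b, a, Or.inl c⟩),
              if_neg (by rintro ⟨a, b, c⟩; exact hc ⟨b, a, Or.inr c⟩)]
        refine ⟨by simp [hval, hp1, hq1], ?_⟩
        intro j lo' hi' v hv
        simp only [PySem.Dict.get?_insert] at hv
        split_ifs at hv with hk
        · injection hv with hveq
          subst hveq
          obtain ⟨rfl, rfl, rfl⟩ : j = i ∧ lo' = lo ∧ hi' = hi := by simpa using hk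
          rw [← hdrop, hval, hp1, hq1]
        · exact hqinv j lo' hi' v hv

-- ===== VERDICT (by name: the statement is the Claim_ definition above) =====
theorem rose_spec : Claim_equal_rose := by
  intro array indexArray lower upper size _
  unfold Spec_rose rose_alt
  have := goB_correct array indexArray size indexArray 0 lower upper PySem.Dict.empty
    le_rfl (by simp) (by intro i lo hi v hv; simp [PySem.Dict.get?_empty] at hv)
  exact this.1.symm
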